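-- pv_equiv track=rewrite | github.com/ShawnZou717/VedioObjectDetection | dataset_tools/yolov5_formatdata_statistics.py | count_bar
-- ===== SOURCE A (Python) =====
-- def count_bar(num_list):
--     min_val = min(num_list)
--     max_val = max(num_list)
--     y = [0 for i in range(max_val - min_val + 1)]
--     x = [min_val+i for i in range(max_val - min_val + 1)]
--
--     for item in num_list:
--         y_index = item - min_val
--         y[y_index] += 1
--
--     return x,y
-- ===== SOURCE B (Python) =====
-- def count_bar(num_list):
--     s = sorted(num_list)
--     min_val = s[0]
--     max_val = s[-1]
--     x = list(range(min_val, max_val + 1))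
--     y = []
--     i = 0
--     n = len(s)
--     for v in x:
--         c = 0
--         while i < n and s[i] == v:
--             c += 1
--             i += 1
--         y.append(c)
--     return x, y
-- ===== Notes on version B (the rewrite author's own statement) =====
-- stated objective: alternative
-- what changed: Replaces A's scatter-increment into a preallocated zero array with sort-then-merge: B sorts num_list, reads min/max as the sorted ends, and builds y by a single two-pointer sweep that counts each value's run in the sorted list while walking the ascending range.
import Mathlib
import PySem

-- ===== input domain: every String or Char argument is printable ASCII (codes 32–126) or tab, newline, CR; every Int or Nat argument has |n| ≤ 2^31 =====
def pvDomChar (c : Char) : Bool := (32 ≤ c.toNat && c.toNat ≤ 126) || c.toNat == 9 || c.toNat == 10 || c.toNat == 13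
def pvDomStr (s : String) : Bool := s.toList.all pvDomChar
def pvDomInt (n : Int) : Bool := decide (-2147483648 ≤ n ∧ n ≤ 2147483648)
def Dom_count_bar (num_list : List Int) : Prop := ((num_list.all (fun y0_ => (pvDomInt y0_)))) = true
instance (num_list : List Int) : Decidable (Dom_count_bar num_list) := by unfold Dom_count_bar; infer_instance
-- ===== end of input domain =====

-- B replaces A's scatter-increment into a preallocated zero array by sort + a two-pointer
-- merge sweep over the sorted list (alternative algorithm, not claimed faster).


-- ===== PORT A =====
def count_bar (num_list : List Int) : List Int × List Int :=
  match PySem.List.min? num_list (fun v => v), PySem.List.max? num_list (fun v => v) with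
  | some min_val, some max_val =>
      let y := (PySem.List.pyRange 0 (max_val - min_val + 1) 1).map (fun _ => (0 : Int))
      let x := (PySem.List.pyRange 0 (max_val - min_val + 1) 1).map (fun i => min_val + i)
      let y := num_list.foldl (fun y item =>
        PySem.List.pySetD y (item - min_val) (PySem.List.pyGetD y (item - min_val) 0 + 1)) y
      (x, y)
  | _, _ => ([], [])   -- unreachable: Python's min raises on [], excluded by Pre_

-- ===== PORT B =====
-- B's inner while loop 'while i < n and s[i] == v: c += 1; i += 1'; the guard keeps
-- 0 ≤ i < n, so pyGetD is exact for Python's s[i] here.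
def pvRun (s : List Int) (n : Nat) (v : Int) (i : Nat) (c : Int) : Nat × Int :=
  if h : i < n ∧ PySem.List.pyGetD s (i : Int) 0 = v then pvRun s n v (i + 1) (c + 1)
  else (i, c)
termination_by n - i
decreasing_by omega

def count_bar_alt (num_list : List Int) : List Int × List Int :=
  let s := PySem.List.sorted num_list (fun v => v) false
  match PySem.List.pyGet? s 0 with
  | none => ([], [])   -- unreachable: Python's s[0] raises IndexError on [], excluded by Pre_
  | some min_val =>
    match PySem.List.pyGet? s (-1) with
    | none => ([], [])   -- unreachable likewise
    | some max_val =>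
      let x := PySem.List.pyRange min_val (max_val + 1) 1
      let n := s.length
      let res := x.foldl (fun (st : Nat × List Int) v =>
          let r := pvRun s n v st.1 0
          (r.1, st.2 ++ [r.2])) (0, ([] : List Int))
      (x, res.2)

-- ===== PRECONDITION & SPEC =====
-- Both A and B raise on the empty list (A: min() of an empty sequence, B: IndexError reading the first sorted element); Pre_ excludes exactly that.
def Pre_count_bar (num_list : List Int) : Prop := num_list ≠ []
instance (num_list : List Int) : Decidable (Pre_count_bar num_list) := by unfold Pre_count_bar; infer_instance
def pvWitness_count_bar : List Int := [0, 2, 2]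

def Spec_count_bar (num_list : List Int) (out : List Int × List Int) : Prop := out = count_bar_alt num_list
instance (num_list : List Int) (out : List Int × List Int) : Decidable (Spec_count_bar num_list out) := by unfold Spec_count_bar; infer_instance

-- ===== CLAIM (what is proved, stated in full; the proofs are below) =====
def Claim_equal_count_bar : Prop := ∀ (num_list : List Int), Dom_count_bar num_list → Pre_count_bar num_list → Spec_count_bar num_list (count_bar num_list)

-- ===== LEMMAS AND PROOFS =====

-- A's scatter loop, read off elementwise: after folding, slot k holds base[k] + count of (mn+k) in l.
theorem scatter_foldl (l : List Int) (mn : Int) (y0 : List Int)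
    (h : ∀ v ∈ l, 0 ≤ v - mn ∧ v - mn < (y0.length : Int)) :
    l.foldl (fun y item =>
      PySem.List.pySetD y (item - mn) (PySem.List.pyGetD y (item - mn) 0 + 1)) y0
    = (List.range y0.length).map (fun k => y0.getD k 0 + (l.count (mn + (k : Int)) : Int)) := by
  induction l generalizing y0 with
  | nil =>
      simp only [List.foldl_nil, List.count_nil, Nat.cast_zero, add_zero]
      refine List.ext_getElem (by simp) ?_
      intro k h1 h2
      simp only [List.getElem_map, List.getElem_range]
      rw [List.getD_eq_getElem y0 0 h1]
  | cons a t ih =>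
      obtain ⟨ha0, hal⟩ := h a List.mem_cons_self
      simp only [List.foldl_cons]
      set j : Nat := (a - mn).toNat with hj
      have hjl : j < y0.length := by omega
      have hset : PySem.List.pySetD y0 (a - mn) (PySem.List.pyGetD y0 (a - mn) 0 + 1)
          = y0.set j (y0.getD j 0 + 1) := by
        rw [PySem.List.pySetD_of_nonneg y0 _ ha0, PySem.List.pyGetD_of_nonneg y0 0 ha0]
      rw [hset, ih _ (by intro v hv; simpa using h v (List.mem_cons_of_mem _ hv))]
      rw [List.length_set]
      refine List.map_congr_left ?_
      intro k hk
      rw [List.mem_range] at hk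
      have hgd : (y0.set j (y0.getD j 0 + 1)).getD k 0
          = if j = k then y0.getD j 0 + 1 else y0.getD k 0 := by
        rcases Classical.em (j = k) with h1 | h1
        · subst h1
          simp [List.getD_eq_getElem?_getD, hjl]
        · simp [List.getD_eq_getElem?_getD, h1]
      have hcnt : ((a :: t).count (mn + (k : Int)) : Int)
          = (t.count (mn + (k : Int)) : Int) + (if j = k then 1 else 0) := by
        rw [List.count_cons]
        have : (a == (mn + (k : Int))) = decide (j = k) := by
          rcases Classical.em (j = k) with h1 | h1
          · have : a = mn + (k : Int) := by omega
            simp [this, h1]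
          · have : a ≠ mn + (k : Int) := by omega
            simp [this, h1]
        rw [this]
        push_cast
        split_ifs <;> simp_all
      rw [hgd, hcnt]
      split_ifs with h1
      · subst h1; ring
      · ring

-- the while loop consumes exactly the leading run of v in s.drop i
theorem pvRun_spec (s : List Int) (v : Int) :
    ∀ (t : List Int) (i : Nat) (c : Int), s.drop i = t →
    pvRun s s.length v i c
      = (i + (t.takeWhile (· == v)).length, c + (t.takeWhile (· == v)).length) := by
  intro t
  induction t with
  | nil =>
      intro i c hdrop
      have hi : s.length ≤ i := by
        by_contra hlt
        have := List.drop_eq_nil_iff.mp hdrop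
        omega
      rw [pvRun]
      simp only [List.takeWhile_nil, List.length_nil]
      rw [dif_neg (by omega)]
      simp
  | cons a t ih =>
      intro i c hdrop
      have hi : i < s.length := by
        by_contra hlt
        rw [List.drop_eq_nil_of_le (by omega)] at hdrop
        simp at hdrop
      have hget : s[i] = a := by
        have h0 : (s.drop i)[0]? = s[i + 0]? := List.getElem?_drop ..
        rw [hdrop, Nat.add_zero, List.getElem?_eq_getElem hi] at h0
        simpa using h0.symm
      have hpy : PySem.List.pyGetD s (i : Int) 0 = a := by
        rw [PySem.List.pyGetD_of_nonneg s 0 (by positivity)]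
        simp only [Int.toNat_natCast]
        rw [List.getD_eq_getElem s 0 hi, hget]
      rw [pvRun]
      by_cases hav : a = v
      · rw [dif_pos ⟨hi, by rw [hpy, hav]⟩]
        rw [ih (i + 1) (c + 1) (by rw [← List.drop_drop]; simp [hdrop])]
        simp only [List.takeWhile_cons, hav, BEq.rfl, if_true, List.length_cons]
        rw [Prod.mk.injEq]
        constructor
        · omega
        · push_cast
          omega
      · rw [dif_neg (by rintro ⟨-, h2⟩; exact hav (hpy ▸ h2))]
        simp only [List.takeWhile_cons, show (a == v) = false by simpa using hav]
        simp

-- in a sorted list whose elements are all ≥ v, the leading run of v has length count v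
theorem run_count (t : List Int) (v : Int) (hs : t.Pairwise (· ≤ ·)) (hge : ∀ a ∈ t, v ≤ a) :
    (t.takeWhile (· == v)).length = t.count v := by
  induction t with
  | nil => simp
  | cons a r ih =>
      rcases List.pairwise_cons.mp hs with ⟨har, hr⟩
      by_cases hav : a = v
      · subst hav
        simp only [List.takeWhile_cons, BEq.rfl, if_true, List.length_cons,
          List.count_cons_self]
        rw [ih hr (fun b hb => hge b (List.mem_cons_of_mem _ hb))]
      · have hcnt0 : r.count v = 0 := by
          rw [List.count_eq_zero]
          intro hv
          have h1 := har v hv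
          have h2 := hge a List.mem_cons_self
          omega
        simp only [List.takeWhile_cons, show (a == v) = false by simpa using hav]
        simp [hav, hcnt0]

-- the remainder after the run is sorted, all > v, and keeps counts of larger values
theorem dropWhile_run (t : List Int) (v : Int) (hs : t.Pairwise (· ≤ ·)) (hge : ∀ a ∈ t, v ≤ a) :
    (t.dropWhile (· == v)).Pairwise (· ≤ ·)
    ∧ (∀ a ∈ t.dropWhile (· == v), v + 1 ≤ a)
    ∧ (∀ w : Int, v < w → (t.dropWhile (· == v)).count w = t.count w) := by
  induction t with
  | nil => simp
  | cons a r ih =>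
      rcases List.pairwise_cons.mp hs with ⟨har, hr⟩
      by_cases hav : a = v
      · subst hav
        simp only [List.dropWhile_cons, BEq.rfl, if_true]
        have := ih hr (fun b hb => hge b (List.mem_cons_of_mem _ hb))
        refine ⟨this.1, this.2.1, fun w hw => ?_⟩
        rw [this.2.2 w hw, List.count_cons]
        simp [show ¬ (a = w) by omega]
      · simp only [List.dropWhile_cons, show (a == v) = false by simpa using hav,
          Bool.false_eq_true, if_false]
        have hav' : v < a := lt_of_le_of_ne (hge a List.mem_cons_self) (Ne.symm hav)
        refine ⟨hs, fun b hb => ?_, fun w _ => by simp⟩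
        rcases List.mem_cons.mp hb with h | h
        · omega
        · have := har b h
          omega

-- B's sweep over the ascending range, with the two-pointer invariant
theorem sweep_spec (s : List Int) :
    ∀ (k : Nat) (v0 : Int) (i : Nat) (y : List Int) (t : List Int),
    s.drop i = t → t.Pairwise (· ≤ ·) → (∀ a ∈ t, v0 ≤ a) →
    (((List.range k).map (fun (j : Nat) => v0 + (j : Int))).foldl
        (fun (st : Nat × List Int) v =>
          let r := pvRun s s.length v st.1 0
          (r.1, st.2 ++ [r.2])) (i, y)).2
      = y ++ (List.range k).map (fun (j : Nat) => (t.count (v0 + (j : Int)) : Int)) := by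
  intro k
  induction k with
  | zero => intro v0 i y t _ _ _; simp
  | succ k ih =>
      intro v0 i y t hdrop hs hge
      have hcons : (List.range (k + 1)).map (fun (j : Nat) => v0 + (j : Int))
          = v0 :: (List.range k).map (fun (j : Nat) => (v0 + 1) + (j : Int)) := by
        rw [List.range_succ_eq_map]
        simp only [List.map_cons, List.map_map, Nat.cast_zero, add_zero]
        congr 1
        refine List.map_congr_left ?_
        intro j _
        simp only [Function.comp_apply]
        push_cast
        omega
      rw [hcons, List.foldl_cons]
      simp only []
      rw [pvRun_spec s v0 t i 0 hdrop]
      have hrc := run_count t v0 hs hge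
      obtain ⟨hs', hge', hcnt'⟩ := dropWhile_run t v0 hs hge
      have hdrop' : s.drop (i + (t.takeWhile (· == v0)).length) = t.dropWhile (· == v0) := by
        rw [← List.drop_drop, hdrop]
        have h := @List.drop_left _ (t.takeWhile (· == v0)) (t.dropWhile (· == v0))
        rw [List.takeWhile_append_dropWhile] at h
        exact h
      rw [ih (v0 + 1) _ _ _ hdrop' hs' hge']
      rw [List.append_assoc]
      congr 1
      rw [List.range_succ_eq_map, List.map_cons, List.map_map]
      simp only [Nat.cast_zero, add_zero, List.cons_append, List.nil_append]
      congr 1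
      · simp [hrc]
      · refine List.map_congr_left ?_
        intro j _
        simp only [Function.comp_apply]
        rw [hcnt' (v0 + 1 + (j : Int)) (by omega)]
        congr 2
        push_cast
        omega

-- ===== VERDICT (by name: the statement is the Claim_ definition above) =====
theorem count_bar_spec : Claim_equal_count_bar := by
  intro l _ hpre
  obtain ⟨mn, hmn⟩ : ∃ mn, PySem.List.min? l (fun v => v) = some mn := by
    cases h : PySem.List.min? l (fun v => v) with
    | none => exact absurd ((PySem.List.min?_eq_none_iff l _).mp h) hpre
    | some m => exact ⟨m, rfl⟩
  obtain ⟨mx, hmx⟩ : ∃ mx, PySem.List.max? l (fun v => v) = some mx := by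
    cases h : PySem.List.max? l (fun v => v) with
    | none => exact absurd ((PySem.List.max?_eq_none_iff l _).mp h) hpre
    | some m => exact ⟨m, rfl⟩
  have hmin : ∀ v ∈ l, mn ≤ v := fun v hv => PySem.List.min?_isMin hmn v hv
  have hmax : ∀ v ∈ l, v ≤ mx := fun v hv => PySem.List.max?_isMax hmx v hv
  have hle : mn ≤ mx := hmax mn (PySem.List.min?_mem hmn)
  -- the sorted list
  set s := PySem.List.sorted l (fun v => v) false with hsdef
  have hperm : s.Perm l := PySem.List.sorted_perm l _ false
  have hsne : s ≠ [] := by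
    intro h
    exact hpre ((PySem.List.sorted_eq_nil_iff (xs := l) (key := fun v => v) (rev := false)).mp (hsdef ▸ h))
  have hpair : s.Pairwise (fun a b => a ≤ b) := PySem.List.sorted_pairwise l (fun v => v)
  have hmem : ∀ a, a ∈ s ↔ a ∈ l := fun a => hperm.mem_iff
  -- s[0] = mn
  obtain ⟨h0, t0, hcons⟩ := List.exists_cons_of_ne_nil hsne
  have hhead : h0 = mn := by
    have h1 : mn ≤ h0 := hmin h0 ((hmem h0).mp (hcons ▸ List.mem_cons_self))
    have h2 : h0 ≤ mn :=
      PySem.List.key_head_sorted_le (xs := l) (key := fun v => v) (hsdef ▸ hcons)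
        mn (PySem.List.min?_mem hmn)
    omega
  have hget0 : PySem.List.pyGet? s 0 = some mn := by
    rw [hcons, PySem.List.pyGet?_zero_cons, hhead]
  -- s[-1] = mx
  have hlast : s.getLast? = some mx := by
    have hl0 : 0 < s.length := List.length_pos_iff.mpr hsne
    rw [List.getLast?_eq_getElem? , List.getElem?_eq_getElem (by omega)]
    congr 1
    have hmem' : s[s.length - 1] ∈ l := (hmem _).mp (List.getElem_mem _)
    have h1 : s[s.length - 1] ≤ mx := hmax _ hmem'
    obtain ⟨p, hp, hpe⟩ := List.getElem_of_mem ((hmem mx).mpr (PySem.List.max?_mem hmx))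
    have h2 : mx ≤ s[s.length - 1] := by
      rw [← hpe]
      rcases Nat.lt_or_ge p (s.length - 1) with hpq | hpq
      · exact List.pairwise_iff_getElem.mp hpair p (s.length - 1) hp (by omega) hpq
      · have : p = s.length - 1 := by omega
        subst this
        exact le_refl _
    omega
  have hgetm1 : PySem.List.pyGet? s (-1) = some mx := by
    rw [PySem.List.pyGet?_neg_one, hlast]
  -- unfold both ports
  unfold Spec_count_bar count_bar count_bar_alt
  rw [hmn, hmx]
  simp only [← hsdef, hget0, hgetm1]
  have hy0len : ((PySem.List.pyRange 0 (mx - mn + 1) 1).map (fun _ => (0 : Int))).length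
      = (mx - mn + 1).toNat := by
    simp [PySem.List.length_pyRange_one]
  rw [scatter_foldl l mn _ (by
    intro v hv
    rw [hy0len]
    have h1 := hmax v hv
    have h2 := hmin v hv
    omega)]
  rw [hy0len]
  have hy0getD : ∀ k : Nat,
      ((PySem.List.pyRange 0 (mx - mn + 1) 1).map (fun _ => (0 : Int))).getD k 0 = 0 := by
    intro k
    simp only [List.getD_eq_getElem?_getD, List.getElem?_map]
    cases (PySem.List.pyRange 0 (mx - mn + 1) 1)[k]? <;> rfl
  have hx : PySem.List.pyRange mn (mx + 1) 1
      = (List.range (mx + 1 - mn).toNat).map (fun (j : Nat) => mn + (j : Int)) := by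
    rw [PySem.List.pyRange_one mn (mx + 1)]
  rw [Prod.mk.injEq]
  constructor
  · rw [PySem.List.pyRange_one 0 (mx - mn + 1), PySem.List.pyRange_one mn (mx + 1)]
    have : (mx - mn + 1 - 0).toNat = (mx + 1 - mn).toNat := by omega
    rw [List.map_map, this]
    refine List.map_congr_left ?_
    intro k _
    simp
  · rw [hx, sweep_spec s ((mx + 1 - mn).toNat) mn 0 [] s (by simp) hpair
      (fun a ha => hmin a ((hmem a).mp ha))]
    have hnn : (mx - mn + 1).toNat = (mx + 1 - mn).toNat := by omega
    rw [hnn, List.nil_append]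
    refine List.map_congr_left ?_
    intro k _
    rw [hy0getD k, hperm.count_eq, zero_add]
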